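-- pv_equiv track=rewrite | github.com/tonghien22890/sam-lib | core/sequence_evaluator.py | _consume_cards_for_combo
-- ===== SOURCE A (Python) =====
-- from typing import List, Dict, Any, Tuple, Set, Optional
--
-- def _consume_cards_for_combo(combo: Dict[str, Any], available: Dict[int, List[int]]) -> Optional[List[int]]:
--     card_ranks = combo.get('cards', [])
--     if not card_ranks:
--         return []
--
--     demand: Dict[int, int] = {}
--     for rank in card_ranks:
--         demand[rank] = demand.get(rank, 0) + 1
--
--     for rank, count in demand.items():
--         if len(available.get(rank, [])) < count:
--             return None
--
--     taken: List[int] = []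
--     for rank in card_ranks:
--         pool = available.get(rank, [])
--         chosen = pool.pop()
--         taken.append(chosen)
--
--     return taken
-- ===== SOURCE B (Python) =====
-- from typing import List, Dict, Any, Optional
--
-- def _consume_cards_for_combo(combo: Dict[str, Any], available: Dict[int, List[int]]) -> Optional[List[int]]:
--     # Single fused pass: take pool[-1 - used] per occurrence; no demand dict,
--     # no separate feasibility loop, and `available` is never mutated.
--     # (Equivalence with A is about the RETURN value only: A pops from the
--     # pools in `available` on success, B leaves them untouched.)
--     taken: List[int] = []
--     used: Dict[int, int] = {}
--     for rank in combo.get('cards', []):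
--         pool = available.get(rank, [])
--         u = used.get(rank, 0)
--         if u >= len(pool):
--             return None
--         taken.append(pool[len(pool) - 1 - u])
--         used[rank] = u + 1
--     return taken
-- ===== Notes on version B (the rewrite author's own statement) =====
-- stated objective: simpler
-- what changed: B replaces A's demand-counting dict plus separate feasibility loop plus destructive pop loop with one non-mutating pass that indexes pool[len(pool)-1-used[rank]] per occurrence and fails on the first exhausted rank; equivalence is about the return value only (A pops from available's pools on success, B never mutates).
import Mathlib
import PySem

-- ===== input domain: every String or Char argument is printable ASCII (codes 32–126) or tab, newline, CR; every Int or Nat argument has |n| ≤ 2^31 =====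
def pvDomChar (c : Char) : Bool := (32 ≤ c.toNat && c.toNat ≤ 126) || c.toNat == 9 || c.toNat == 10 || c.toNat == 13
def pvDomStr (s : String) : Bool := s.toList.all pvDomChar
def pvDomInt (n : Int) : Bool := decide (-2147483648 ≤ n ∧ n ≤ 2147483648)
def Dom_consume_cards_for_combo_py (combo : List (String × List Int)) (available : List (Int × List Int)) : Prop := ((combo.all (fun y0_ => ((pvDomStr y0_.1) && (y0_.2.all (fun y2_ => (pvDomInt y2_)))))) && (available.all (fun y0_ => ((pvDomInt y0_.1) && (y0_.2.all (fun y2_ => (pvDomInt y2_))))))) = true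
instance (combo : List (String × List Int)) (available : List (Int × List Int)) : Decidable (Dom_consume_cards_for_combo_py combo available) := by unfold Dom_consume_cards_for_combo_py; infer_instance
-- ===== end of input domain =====

-- B fuses A's demand dict + feasibility precheck + pop loop into one non-mutating indexed pass; equivalence is about the return value (A pops from available's pools on success, B never mutates).


-- ===== PORT A =====
-- demand[rank] = demand.get(rank, 0) + 1 over card_ranks
def pvA_demand (ranks : List Int) : PySem.Dict Int Int :=
  ranks.foldl (fun d r => d.insert r (d.getD r 0 + 1)) PySem.Dict.empty

-- the consuming loop: pool = available.get(rank, []); chosen = pool.pop(); taken.append(chosen)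
-- (pop on an empty pool is unreachable here: the feasibility precheck has passed; the .getD 0 default is never used)
def pvA_take : List Int → PySem.Dict Int (List Int) → List Int → List Int
  | [], _, taken => taken
  | r :: rs, av, taken =>
    let pool := av.getD r []
    let chosen := pool.getLast?.getD 0
    pvA_take rs (av.insert r pool.dropLast) (taken ++ [chosen])

def consume_cards_for_combo_py (combo : List (String × List Int)) (available : List (Int × List Int)) : Option (List Int) :=
  let card_ranks := (PySem.Dict.mk combo).getD "cards" []
  if card_ranks = [] then some []
  else
    let demand := pvA_demand card_ranks
    if demand.items.any (fun rc => decide ((((PySem.Dict.mk available).getD rc.1 []).length : Int) < rc.2)) then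
      none
    else
      some (pvA_take card_ranks (PySem.Dict.mk available) [])

-- ===== PORT B =====
-- one pass: u = used.get(rank, 0); fail if u >= len(pool); take pool[len(pool)-1-u]; used[rank] = u+1
def pvB_go (av : PySem.Dict Int (List Int)) : List Int → PySem.Dict Int Nat → List Int → Option (List Int)
  | [], _, taken => some taken
  | r :: rs, used, taken =>
    let pool := av.getD r []
    let u := used.getD r 0
    if pool.length ≤ u then none
    else pvB_go av rs (used.insert r (u + 1)) (taken ++ [pool.getD (pool.length - 1 - u) 0])

def consume_cards_for_combo_py_alt (combo : List (String × List Int)) (available : List (Int × List Int)) : Option (List Int) :=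
  pvB_go (PySem.Dict.mk available) ((PySem.Dict.mk combo).getD "cards" []) PySem.Dict.empty []

-- ===== PRECONDITION & SPEC =====
def Spec_consume_cards_for_combo_py (combo : List (String × List Int)) (available : List (Int × List Int)) (out : Option (List Int)) : Prop := out = consume_cards_for_combo_py_alt combo available
instance (combo : List (String × List Int)) (available : List (Int × List Int)) (out : Option (List Int)) : Decidable (Spec_consume_cards_for_combo_py combo available out) := by unfold Spec_consume_cards_for_combo_py; infer_instance

-- ===== CLAIM (what is proved, stated in full; the proofs are below) =====
def Claim_equal_consume_cards_for_combo_py : Prop := ∀ (combo : List (String × List Int)) (available : List (Int × List Int)), Dom_consume_cards_for_combo_py combo available → Spec_consume_cards_for_combo_py combo available (consume_cards_for_combo_py combo available)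

-- ===== LEMMAS AND PROOFS =====

-- success: if every remaining demand fits the original pools (offset by what is already used),
-- B's indexed pass produces exactly A's pop loop result
theorem pv_take_eq (av : PySem.Dict Int (List Int)) :
    ∀ (ranks : List Int) (d : PySem.Dict Int (List Int)) (u : PySem.Dict Int Nat) (taken : List Int),
    (∀ r, d.getD r [] = (av.getD r []).take ((av.getD r []).length - u.getD r 0)) →
    (∀ r ∈ ranks, ranks.count r + u.getD r 0 ≤ (av.getD r []).length) →
    pvB_go av ranks u taken = some (pvA_take ranks d taken) := by
  intro ranks
  induction ranks with
  | nil => intro d u taken _ _; simp [pvB_go, pvA_take]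
  | cons r rs ih =>
    intro d u taken hInv hfeas
    have hr := hfeas r (by simp)
    rw [List.count_cons_self] at hr
    have hu : u.getD r 0 < (av.getD r []).length := by omega
    have hchosen : (d.getD r []).getLast?.getD 0
        = (av.getD r []).getD ((av.getD r []).length - 1 - u.getD r 0) 0 := by
      rw [hInv r, List.getLast?_eq_getElem?, List.length_take, List.getD_eq_getElem?_getD,
        List.getElem?_take]
      have h4 : min ((av.getD r []).length - u.getD r 0) (av.getD r []).length - 1
          = (av.getD r []).length - 1 - u.getD r 0 := by omega
      rw [h4, if_pos (by omega)]
    have hdrop : (d.getD r []).dropLast = (av.getD r []).take ((av.getD r []).length - (u.getD r 0 + 1)) := by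
      rw [hInv r, List.dropLast_eq_take, List.length_take, List.take_take]
      congr 1
      omega
    simp only [pvB_go, pvA_take]
    rw [if_neg (by omega)]
    rw [hchosen]
    apply ih
    · intro r'
      by_cases h : r' = r
      · subst h
        rw [PySem.Dict.getD_insert_self, PySem.Dict.getD_insert_self, hdrop]
      · simp only [PySem.Dict.getD_insert, if_neg h]
        exact hInv r'
    · intro r' hr'
      by_cases h : r' = r
      · subst h
        rw [PySem.Dict.getD_insert_self]
        omega
      · simp only [PySem.Dict.getD_insert, if_neg h]
        have := hfeas r' (by simp [hr'])
        simp only [List.count_cons, beq_iff_eq, if_neg (Ne.symm h)] at this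
        omega

-- failure: if some rank occurring in ranks is over-demanded, B returns none
theorem pv_fail (av : PySem.Dict Int (List Int)) :
    ∀ (ranks : List Int) (u : PySem.Dict Int Nat) (taken : List Int) (r : Int),
    r ∈ ranks → (av.getD r []).length < ranks.count r + u.getD r 0 →
    pvB_go av ranks u taken = none := by
  intro ranks
  induction ranks with
  | nil => intro _ _ r h; simp at h
  | cons h rs ih =>
    intro u taken r hmem hlt
    simp only [pvB_go]
    by_cases hfail : (av.getD h []).length ≤ u.getD h 0
    · rw [if_pos hfail]
    · rw [if_neg hfail]
      by_cases heq : r = h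
      · subst heq
        rw [List.count_cons_self] at hlt
        have hrs : 0 < rs.count r := by omega
        apply ih _ _ r (List.count_pos_iff.mp hrs)
        rw [PySem.Dict.getD_insert_self]
        omega
      · apply ih _ _ r ((List.mem_cons.mp hmem).resolve_left heq)
        simp only [PySem.Dict.getD_insert, if_neg heq]
        simp only [List.count_cons, beq_iff_eq, if_neg (Ne.symm heq)] at hlt
        omega

theorem pv_main (combo : List (String × List Int)) (available : List (Int × List Int)) :
    consume_cards_for_combo_py combo available = consume_cards_for_combo_py_alt combo available := by
  unfold consume_cards_for_combo_py consume_cards_for_combo_py_alt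
  set ranks := (PySem.Dict.mk combo).getD "cards" [] with hranks
  set av := PySem.Dict.mk available with hav
  by_cases hnil : ranks = []
  · rw [if_pos hnil, hnil]
    simp [pvB_go]
  rw [if_neg hnil]
  have hdemand : pvA_demand ranks = PySem.Dict.counter ranks :=
    PySem.Dict.foldl_insert_getD_add_one_eq_counter ranks
  by_cases hany : (pvA_demand ranks).items.any (fun rc => decide (((av.getD rc.1 []).length : Int) < rc.2))
  · rw [if_pos hany]
    rw [hdemand, PySem.Dict.items_counter, List.any_map, List.any_eq_true] at hany
    obtain ⟨r, hrmem, hrlt⟩ := hany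
    simp only [Function.comp, decide_eq_true_eq] at hrlt
    have hrmem' : r ∈ ranks := (PySem.Set.mem_ofList _ _).mp hrmem
    have hlt : (av.getD r []).length < ranks.count r := by exact_mod_cast hrlt
    rw [pv_fail av ranks PySem.Dict.empty [] r hrmem' (by rw [PySem.Dict.getD_empty]; omega)]
  · rw [if_neg hany]
    rw [hdemand, PySem.Dict.items_counter, List.any_map] at hany
    rw [pv_take_eq av ranks av PySem.Dict.empty []]
    · intro r
      rw [PySem.Dict.getD_empty]
      simp [List.take_length]
    · intro r hrmem
      rw [PySem.Dict.getD_empty]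
      have : ¬ (((av.getD r []).length : Int) < (ranks.count r : Int)) := by
        intro hc
        apply hany
        rw [List.any_eq_true]
        exact ⟨r, (PySem.Set.mem_ofList _ _).mpr hrmem, by simpa using hc⟩
      omega

-- ===== VERDICT (by name: the statement is the Claim_ definition above) =====
theorem consume_cards_for_combo_py_spec : Claim_equal_consume_cards_for_combo_py := by
  intro combo available _
  exact pv_main combo available
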